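-- pv_equiv track=rewrite | github.com/Vignesh-Ram-ViRa/vira_services | utilities/file_updater.py | _extract_class_annotations
-- ===== SOURCE A (Python) =====
-- from typing import Dict, List, Any, Optional, Tuple
--
-- def _extract_class_annotations(content: str) -> List[str]:
--     """Extract class-level annotations."""
--     lines = content.split('\n')
--     annotations = []
--
--     for line in lines:
--         if line.strip().startswith('@') and 'public class' not in line:
--             annotations.append(line.strip())
--         elif 'public class' in line:
--             break
--
--     return annotations
-- ===== SOURCE B (Python) =====
-- from typing import List
--
-- def _extract_class_annotations(content: str) -> List[str]:
--     """Extract class-level annotations via a single character-level streaming pass: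
--     no split() -- build each line in a buffer, flush and classify it at every newline."""
--     out = []
--     buf = []
--     for ch in content:
--         if ch == '\n':
--             line = ''.join(buf)
--             if 'public class' in line:
--                 return out
--             s = line.strip()
--             if s.startswith('@'):
--                 out.append(s)
--             buf = []
--         else:
--             buf.append(ch)
--     line = ''.join(buf)
--     if 'public class' not in line:
--         s = line.strip()
--         if s.startswith('@'):
--             out.append(s)
--     return out
-- ===== Notes on version B (the rewrite author's own statement) =====
-- stated objective: alternative
-- what changed: Replaces A's split-into-lines list plus accumulate-with-break loop by a single character-level streaming pass: no split at all, each line is built in a buffer and flushed/classified when a newline (or the end of input) is reached.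
import Mathlib
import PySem

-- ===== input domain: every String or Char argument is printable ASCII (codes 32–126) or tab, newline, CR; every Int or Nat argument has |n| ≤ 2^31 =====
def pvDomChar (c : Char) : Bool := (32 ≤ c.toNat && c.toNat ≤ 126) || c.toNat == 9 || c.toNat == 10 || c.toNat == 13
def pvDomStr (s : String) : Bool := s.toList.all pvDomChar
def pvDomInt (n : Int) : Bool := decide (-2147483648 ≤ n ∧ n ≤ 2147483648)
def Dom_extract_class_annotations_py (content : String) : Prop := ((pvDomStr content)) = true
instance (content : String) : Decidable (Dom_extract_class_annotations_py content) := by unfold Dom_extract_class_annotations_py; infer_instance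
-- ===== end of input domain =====

-- B replaces A's split-into-lines loop by a single character-level streaming pass
-- (a line buffer flushed and classified at each newline; no split) — objective: alternative.

-- ===== PORT A =====
-- A's for-loop with break over content.split('\n'):
-- collect stripped '@'-lines not containing 'public class'; stop at the first line containing 'public class'.
def goA_extract : List (List Char) → List String
  | [] => []
  | l :: rest =>
    if PySem.Chars.startswith (PySem.Chars.strip l) "@".toList
        && !(PySem.Chars.isIn "public class".toList l) then
      String.ofList (PySem.Chars.strip l) :: goA_extract rest
    else if PySem.Chars.isIn "public class".toList l then
      []
    else
      goA_extract rest

def extract_class_annotations_py (content : String) : List String :=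
  goA_extract (PySem.Chars.splitOn content.toList "\n".toList)

-- ===== PORT B =====
-- Source B's streaming loop: state = (remaining chars, current line buffer, out accumulator);
-- at '\n' (and once at the end) the buffered line is classified, 'return out' = stop recursing.
def goB_extract : List Char → List Char → List String → List String
  | [], buf, out =>
      if PySem.Chars.isIn "public class".toList buf then out
      else if PySem.Chars.startswith (PySem.Chars.strip buf) "@".toList then
        out ++ [String.ofList (PySem.Chars.strip buf)]
      else out
  | c :: rest, buf, out =>
      if c = '\n' then
        if PySem.Chars.isIn "public class".toList buf then out
        else if PySem.Chars.startswith (PySem.Chars.strip buf) "@".toList then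
          goB_extract rest [] (out ++ [String.ofList (PySem.Chars.strip buf)])
        else goB_extract rest [] out
      else goB_extract rest (buf ++ [c]) out

def extract_class_annotations_py_alt (content : String) : List String :=
  goB_extract content.toList [] []

-- ===== PRECONDITION & SPEC =====
def Spec_extract_class_annotations_py (content : String) (out : List String) : Prop := out = extract_class_annotations_py_alt content
instance (content : String) (out : List String) : Decidable (Spec_extract_class_annotations_py content out) := by unfold Spec_extract_class_annotations_py; infer_instance

-- ===== CLAIM =====
def Claim_equal_extract_class_annotations_py : Prop := ∀ (content : String), Dom_extract_class_annotations_py content → Spec_extract_class_annotations_py content (extract_class_annotations_py content)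

-- ===== LEMMAS AND PROOFS =====
-- Reference line-splitter: Python's split('\n') as a simple structural recursion on the chars.
def splitNL : List Char → List (List Char)
  | [] => [[]]
  | c :: cs => if c = '\n' then [] :: splitNL cs else (splitNL cs).modifyHead (c :: ·)

lemma splitNL_ne_nil (l : List Char) : splitNL l ≠ [] := by
  cases l with
  | nil => simp [splitNL]
  | cons c cs => by_cases hc : c = '\n' <;> simp [splitNL, hc] <;> cases h : splitNL cs <;> simp_all [splitNL_ne_nil cs]

lemma go_spec (fuel : Nat) (l cur : List Char) (acc : List (List Char))
    (h : l.length < fuel) :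
    PySem.Chars.splitOn.go ['\n'] fuel l cur acc =
      acc.reverse ++ (splitNL l).modifyHead (cur.reverse ++ ·) := by
  induction fuel generalizing l cur acc with
  | zero => omega
  | succ n ih =>
    cases l with
    | nil => simp [PySem.Chars.splitOn.go, splitNL]
    | cons c rest =>
      rw [PySem.Chars.splitOn.go]
      by_cases hc : c = '\n'
      · subst hc
        simp only [List.isPrefixOf, if_pos, splitNL]
        rw [ih _ _ _ (by simpa using Nat.lt_of_succ_lt_succ (by simpa using h))]
        cases hs : splitNL rest <;> simp [hs]
      · have hnp : ¬ (['\n'].isPrefixOf (c :: rest) = true) := by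
          simp [List.isPrefixOf]; exact fun h' => hc h'.symm
        rw [if_neg hnp, ih _ _ _ (by simpa using Nat.lt_of_succ_lt_succ h)]
        simp only [splitNL, if_neg hc]
        cases hs : splitNL rest with
        | nil => exact absurd hs (splitNL_ne_nil rest)
        | cons a as => simp

lemma splitOn_eq_splitNL (cs : List Char) : PySem.Chars.splitOn cs ['\n'] = splitNL cs := by
  unfold PySem.Chars.splitOn
  rw [go_spec _ _ _ _ (by omega)]
  cases h : splitNL cs with
  | nil => exact absurd h (splitNL_ne_nil cs)
  | cons a as => simp

lemma modifyHead_id' {α : Type} (l : List α) : l.modifyHead (fun x => x) = l := by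
  cases l <;> simp

-- The streaming pass equals A's per-line loop run on the split lines (current buffer prepended to the first line).
lemma goB_eq_goA (cs : List Char) : ∀ (buf : List Char) (out : List String),
    goB_extract cs buf out = out ++ goA_extract ((splitNL cs).modifyHead (buf ++ ·)) := by
  induction cs with
  | nil =>
    intro buf out
    by_cases hi : PySem.Chars.isIn "public class".toList buf = true <;>
      by_cases hs : PySem.Chars.startswith (PySem.Chars.strip buf) "@".toList = true <;>
      simp_all [goB_extract, splitNL, goA_extract]
  | cons c rest ih =>
    intro buf out
    by_cases hc : c = '\n'
    · subst hc
      by_cases hi : PySem.Chars.isIn "public class".toList buf = true <;>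
        by_cases hs : PySem.Chars.startswith (PySem.Chars.strip buf) "@".toList = true <;>
        simp_all [goB_extract, splitNL, goA_extract, modifyHead_id']
    · have hmod : (splitNL (c :: rest)).modifyHead (buf ++ ·) =
          (splitNL rest).modifyHead ((buf ++ [c]) ++ ·) := by
        simp only [splitNL, if_neg hc]
        cases hr : splitNL rest with
        | nil => exact absurd hr (splitNL_ne_nil rest)
        | cons a as => simp
      simp only [goB_extract, if_neg hc, ih, hmod]

-- ===== VERDICT =====
theorem extract_class_annotations_py_spec : Claim_equal_extract_class_annotations_py := by
  intro content _
  unfold Spec_extract_class_annotations_py extract_class_annotations_py extract_class_annotations_py_alt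
  have h1 : ("\n".toList : List Char) = ['\n'] := rfl
  rw [h1, splitOn_eq_splitNL, goB_eq_goA]
  cases h : splitNL content.toList with
  | nil => exact absurd h (splitNL_ne_nil _)
  | cons a as => simp
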